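-- pv_equiv track=rewrite | github.com/Yuruzo/PythonLr1Ts1 | main.py | product_max_not_coprime_and_sum_digits_less_than_five
-- ===== SOURCE A (Python) =====
-- import math
--
-- def product_max_not_coprime_and_sum_digits_less_than_five(n):
--     def smallest_divisor(n):
--         for i in range(2, int(n**0.5) + 1):
--             if n % i == 0:
--                 return i
--         return n
--
--     def sum_digits_less_than_five(n):
--         return sum(int(digit) for digit in str(n) if int(digit) < 5)
--
--     min_divisor = smallest_divisor(n)
--     max_not_coprime = -1
--
--     for i in range(2, n):
--         if math.gcd(n, i) != 1 and i % min_divisor != 0: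
--             if i > max_not_coprime:
--                 max_not_coprime = i
--
--     sum_digits = sum_digits_less_than_five(n)
--     return max_not_coprime * sum_digits
-- ===== SOURCE B (Python) =====
-- def product_max_not_coprime_and_sum_digits_less_than_five(n):
--     # O(sqrt n): the largest i < n with gcd(n, i) != 1 and i not divisible by the
--     # smallest prime factor p is n - q, where q is the second-smallest distinct
--     # prime factor of n (and -1 when n has no second distinct prime factor).
--     def smallest_factor(m):
--         i = 2
--         while i * i <= m:
--             if m % i == 0:
--                 return i
--             i += 1
--         return m
--
--     p = smallest_factor(n)
--     m = n
--     if p > 1: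
--         while m % p == 0:
--             m //= p
--     max_not_coprime = n - smallest_factor(m) if m > 1 else -1
--
--     s = 0
--     m = n
--     while m > 0:
--         d = m % 10
--         if d < 5:
--             s += d
--         m //= 10
--     return max_not_coprime * s
-- ===== Notes on version B (the rewrite author's own statement) =====
-- stated objective: faster
-- what changed: Instead of scanning every i in range(2, n) for the maximal i with gcd(n,i)!=1 and i not divisible by the smallest prime factor, B factors n by trial division and returns n minus the second-smallest distinct prime factor (or -1 if none), and computes the digit sum arithmetically instead of via str(n).
import Mathlib
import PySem

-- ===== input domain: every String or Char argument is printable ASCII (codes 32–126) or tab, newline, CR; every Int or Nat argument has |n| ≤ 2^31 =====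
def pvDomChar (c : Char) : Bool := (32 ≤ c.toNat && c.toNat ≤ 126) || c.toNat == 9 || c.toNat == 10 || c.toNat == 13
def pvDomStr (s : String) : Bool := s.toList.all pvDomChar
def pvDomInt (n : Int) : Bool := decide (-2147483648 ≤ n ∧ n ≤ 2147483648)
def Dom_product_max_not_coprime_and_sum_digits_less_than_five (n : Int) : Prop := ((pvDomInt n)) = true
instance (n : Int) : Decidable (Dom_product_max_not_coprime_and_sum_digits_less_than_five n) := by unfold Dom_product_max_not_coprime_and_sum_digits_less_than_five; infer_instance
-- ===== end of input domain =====

-- B replaces A's O(n) scan for the maximal i < n with gcd(n,i) ≠ 1 and i not divisible by the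
-- smallest prime factor by trial division: that maximum is n minus the second-smallest
-- distinct prime factor of n (or -1 if there is none), and the digit sum is computed
-- arithmetically instead of through str(n).

-- ===== PORT A =====
-- helper `smallest_divisor`: the `for i in range(2, int(n**0.5)+1)` loop with early return is
-- `find?` over the same range; `int(n**0.5)` is ported as `Nat.sqrt` (exact for 0 ≤ n ≤ 2^31,
-- where the float square root never crosses an integer boundary).
def pvSmallestDivisorA (n : Int) : Int :=
  match (PySem.List.pyRange 2 ((n.toNat.sqrt : Int) + 1) 1).find?
      (fun i => PySem.Int.mod n i == 0) with
  | some i => i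
  | none => n

-- the body of A's main loop: `if math.gcd(n, i) != 1 and i % min_divisor != 0: if i > acc: acc = i`
def pvLoopA (n d acc i : Int) : Int :=
  if Int.gcd n i ≠ 1 ∧ PySem.Int.mod i d ≠ 0 then (if acc < i then i else acc) else acc

-- `int(digit)` on a character of str(n) is its code minus 48 (every character of str(n) is a
-- decimal digit for the n ≥ 0 admitted by Pre_).
def product_max_not_coprime_and_sum_digits_less_than_five (n : Int) : Int :=
  let minDivisor := pvSmallestDivisorA n
  let maxNotCoprime := (PySem.List.pyRange 2 n 1).foldl (pvLoopA n minDivisor) (-1)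
  let sumDigits := (((PySem.Int.toStr n).toList.filter
      (fun c => (c.toNat : Int) - 48 < 5)).map (fun c => (c.toNat : Int) - 48)).sum
  maxNotCoprime * sumDigits

-- ===== PORT B =====
-- `smallest_factor`: while i*i <= m: … ; the recursion follows the loop literally, with a
-- fuel argument (m + 2 - i).toNat that only makes it total: fuel 0 implies i >= m + 2, where
-- the loop guard i*i <= m is false anyway, so the fuel never changes the computed value.
def pvSmallestFactorBGo : Nat → Int → Int → Int
  | 0, m, _ => m
  | Nat.succ f, m, i =>
    if i * i ≤ m then
      (if PySem.Int.mod m i = 0 then i else pvSmallestFactorBGo f m (i + 1))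
    else m

def pvSmallestFactorB (m : Int) (i : Int) : Int :=
  pvSmallestFactorBGo (m + 2 - i).toNat m i

-- the `while m % p == 0: m //= p` loop, with fuel m.natAbs (fuel 0 means m = 0, where the
-- `m ≠ 0` totality conjunct stops the loop anyway; in B's Python the loop runs only when
-- p = smallest_factor(n) > 1, hence n ≥ 2, and then m never reaches 0).
def pvStripBGo : Nat → Int → Int → Int
  | 0, m, _ => m
  | Nat.succ f, m, p =>
    if 1 < p ∧ PySem.Int.mod m p = 0 ∧ m ≠ 0 then
      pvStripBGo f (PySem.Int.floordiv m p) p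
    else m

def pvStripB (m p : Int) : Int := pvStripBGo m.natAbs m p

-- the digit-sum while loop with accumulator s, fuel m.toNat (fuel 0 means m ≤ 0, where the
-- guard 0 < m is false anyway).
def pvDigitSumBGo : Nat → Int → Int → Int
  | 0, _, s => s
  | Nat.succ f, m, s =>
    if 0 < m then
      pvDigitSumBGo f (PySem.Int.floordiv m 10)
        (if PySem.Int.mod m 10 < 5 then s + PySem.Int.mod m 10 else s)
    else s

def pvDigitSumB (m s : Int) : Int := pvDigitSumBGo m.toNat m s

def product_max_not_coprime_and_sum_digits_less_than_five_alt (n : Int) : Int :=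
  let p := pvSmallestFactorB n 2
  let m := if 1 < p then pvStripB n p else n
  let maxNotCoprime := if 1 < m then n - pvSmallestFactorB m 2 else -1
  maxNotCoprime * pvDigitSumB n 0

-- ===== PRECONDITION & SPEC =====
-- Python A raises TypeError on n < 0 (int() of the complex value n**0.5); Pre_ admits exactly
-- the nonnegative inputs, on all of which A returns.
def Pre_product_max_not_coprime_and_sum_digits_less_than_five (n : Int) : Prop := 0 ≤ n
instance (n : Int) : Decidable (Pre_product_max_not_coprime_and_sum_digits_less_than_five n) := by unfold Pre_product_max_not_coprime_and_sum_digits_less_than_five; infer_instance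
def pvWitness_product_max_not_coprime_and_sum_digits_less_than_five : Int := 12

def Spec_product_max_not_coprime_and_sum_digits_less_than_five (n : Int) (out : Int) : Prop := out = product_max_not_coprime_and_sum_digits_less_than_five_alt n
instance (n : Int) (out : Int) : Decidable (Spec_product_max_not_coprime_and_sum_digits_less_than_five n out) := by unfold Spec_product_max_not_coprime_and_sum_digits_less_than_five; infer_instance

-- ===== CLAIM (what is proved, stated in full; the proofs are below) =====
def Claim_equal_product_max_not_coprime_and_sum_digits_less_than_five : Prop := ∀ (n : Int), Dom_product_max_not_coprime_and_sum_digits_less_than_five n → Pre_product_max_not_coprime_and_sum_digits_less_than_five n → Spec_product_max_not_coprime_and_sum_digits_less_than_five n (product_max_not_coprime_and_sum_digits_less_than_five n)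


-- ===== LEMMAS AND PROOFS =====

theorem pvRange_nil (a b : Int) (h : b ≤ a) : PySem.List.pyRange a b 1 = [] :=
  List.eq_nil_iff_forall_not_mem.mpr fun x hx => by
    rw [PySem.List.mem_pyRange_one] at hx; omega

-- ---- characterisation of find? over an ascending range ----
theorem find?_pyRange_some (p : Int → Bool) (b m : Int) :
    ∀ (k : Nat) (a : Int), (b - a).toNat = k → a ≤ m → m < b → p m = true →
    (∀ j, a ≤ j → j < m → p j = false) →
    (PySem.List.pyRange a b 1).find? p = some m := by
  intro k
  induction k with
  | zero => intro a hk hm1 hm2 _ _; omega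
  | succ k ih =>
    intro a hk hm1 hm2 hpm hmin
    rw [PySem.List.pyRange_one_cons (by omega)]
    by_cases hma : m = a
    · subst hma; simp [List.find?, hpm]
    · have hpa : p a = false := hmin a le_rfl (by omega)
      simp only [List.find?, hpa]
      exact ih (a + 1) (by omega) (by omega) hm2 hpm (fun j h1 h2 => hmin j (by omega) h2)

-- ---- characterisation of A's max-tracking fold ----
theorem foldl_loopA_ge_acc (n d b : Int) :
    ∀ (k : Nat) (a acc : Int), (b - a).toNat = k →
    acc ≤ (PySem.List.pyRange a b 1).foldl (pvLoopA n d) acc := by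
  intro k
  induction k with
  | zero => intro a acc hk; rw [pvRange_nil a b (by omega)]; simp
  | succ k ih =>
    intro a acc hk
    rw [PySem.List.pyRange_one_cons (by omega)]
    simp only [List.foldl]
    refine le_trans ?_ (ih (a + 1) (pvLoopA n d acc a) (by omega))
    unfold pvLoopA; split_ifs <;> omega

theorem foldl_loopA_ge_mem (n d b j : Int)
    (hpj : Int.gcd n j ≠ 1 ∧ PySem.Int.mod j d ≠ 0) :
    ∀ (k : Nat) (a acc : Int), (b - a).toNat = k → a ≤ j → j < b →
    j ≤ (PySem.List.pyRange a b 1).foldl (pvLoopA n d) acc := by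
  intro k
  induction k with
  | zero => intro a acc hk h1 h2; omega
  | succ k ih =>
    intro a acc hk h1 h2
    rw [PySem.List.pyRange_one_cons (by omega)]
    simp only [List.foldl]
    by_cases hja : j = a
    · subst hja
      have hj : j ≤ pvLoopA n d acc j := by
        unfold pvLoopA
        rw [if_pos hpj]
        split_ifs <;> omega
      exact le_trans hj (foldl_loopA_ge_acc n d b k (j + 1) _ (by omega))
    · exact ih (a + 1) _ (by omega) (by omega) h2

theorem foldl_loopA_cases (n d b : Int) :
    ∀ (k : Nat) (a acc : Int), (b - a).toNat = k →
    (PySem.List.pyRange a b 1).foldl (pvLoopA n d) acc = acc ∨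
    ((Int.gcd n ((PySem.List.pyRange a b 1).foldl (pvLoopA n d) acc) ≠ 1 ∧
      PySem.Int.mod ((PySem.List.pyRange a b 1).foldl (pvLoopA n d) acc) d ≠ 0) ∧
     a ≤ (PySem.List.pyRange a b 1).foldl (pvLoopA n d) acc ∧
     (PySem.List.pyRange a b 1).foldl (pvLoopA n d) acc < b) := by
  intro k
  induction k with
  | zero => intro a acc hk; rw [pvRange_nil a b (by omega)]; simp
  | succ k ih =>
    intro a acc hk
    rw [PySem.List.pyRange_one_cons (by omega)]
    simp only [List.foldl]
    have hstep : pvLoopA n d acc a = acc ∨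
        (pvLoopA n d acc a = a ∧ (Int.gcd n a ≠ 1 ∧ PySem.Int.mod a d ≠ 0)) := by
      unfold pvLoopA
      split_ifs with h1 h2
      · right; exact ⟨rfl, h1⟩
      · left; rfl
      · left; rfl
    rcases ih (a + 1) (pvLoopA n d acc a) (by omega) with h | h
    · rw [h]
      rcases hstep with h' | ⟨h', hP⟩
      · left; exact h'
      · right; rw [h']; exact ⟨hP, le_rfl, by omega⟩
    · obtain ⟨hP, hge, hlt⟩ := h
      right; exact ⟨hP, by omega, hlt⟩

theorem foldl_loopA_none (n d b : Int)
    (hnone : ∀ j, 2 ≤ j → j < b → ¬(Int.gcd n j ≠ 1 ∧ PySem.Int.mod j d ≠ 0)) :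
    ∀ (k : Nat) (a acc : Int), (b - a).toNat = k → 2 ≤ a →
    (PySem.List.pyRange a b 1).foldl (pvLoopA n d) acc = acc := by
  intro k
  induction k with
  | zero => intro a acc hk _; rw [pvRange_nil a b (by omega)]; simp
  | succ k ih =>
    intro a acc hk ha
    rw [PySem.List.pyRange_one_cons (by omega)]
    simp only [List.foldl]
    have h0 : pvLoopA n d acc a = acc := by
      unfold pvLoopA; rw [if_neg (hnone a ha (by omega))]
    rw [h0]
    exact ih (a + 1) acc (by omega) (by omega)

-- ---- the two trial divisions compute Nat.minFac ----
theorem sdA_eq_minFac (N : Nat) (h2 : 2 ≤ N) : pvSmallestDivisorA (N : Int) = (N.minFac : Int) := by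
  unfold pvSmallestDivisorA
  simp only [Int.toNat_natCast]
  by_cases hp : N.Prime
  · have hnone : (PySem.List.pyRange 2 ((N.sqrt : Int) + 1) 1).find?
        (fun i => PySem.Int.mod (N : Int) i == 0) = none := by
      rw [List.find?_eq_none]
      intro x hx
      rw [PySem.List.mem_pyRange_one] at hx
      simp only [beq_iff_eq, PySem.Int.mod_eq_zero_iff_dvd]
      intro hdvd
      obtain ⟨J, rfl⟩ : ∃ J : Nat, x = (J : Int) := ⟨x.toNat, (Int.toNat_of_nonneg (by omega)).symm⟩
      have hJ : J ∣ N := by exact_mod_cast hdvd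
      exact (Nat.prime_def_le_sqrt.mp hp).2 J (by exact_mod_cast hx.1) (by omega) hJ
    rw [hnone, hp.minFac_eq]
  · have hsq' : N.minFac * N.minFac ≤ N := by
      have := Nat.minFac_sq_le_self (by omega) hp
      nlinarith [this]
    have hsq : N.minFac ≤ N.sqrt := Nat.le_sqrt.mpr hsq'
    have h2m : 2 ≤ N.minFac := (Nat.minFac_prime (by omega)).two_le
    have := find?_pyRange_some (fun i => PySem.Int.mod (N : Int) i == 0)
      ((N.sqrt : Int) + 1) (N.minFac : Int) ((N.sqrt : Int) + 1 - 2).toNat 2 rfl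
      (by exact_mod_cast h2m) (by exact_mod_cast Nat.lt_succ_of_le hsq)
      (by simp only [beq_iff_eq, PySem.Int.mod_eq_zero_iff_dvd]
          exact_mod_cast Int.natCast_dvd_natCast.mpr (Nat.minFac_dvd N))
      (by intro j h1 h2j
          simp only [beq_iff_eq, PySem.Int.mod_eq_zero_iff_dvd, Bool.eq_false_iff, ne_eq]
          intro hdvd
          obtain ⟨J, rfl⟩ : ∃ J : Nat, j = (J : Int) :=
            ⟨j.toNat, (Int.toNat_of_nonneg (by omega)).symm⟩
          have hJ : J ∣ N := by exact_mod_cast hdvd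
          have := Nat.minFac_le_of_dvd (by exact_mod_cast h1) hJ
          omega)
    rw [this]

theorem sfBGo_inv (N : Nat) (h2 : 2 ≤ N) :
    ∀ (f : Nat) (i : Nat), ((N : Int) + 2 - (i : Int)).toNat = f → 2 ≤ i →
    (∀ j, 2 ≤ j → j < i → ¬ j ∣ N) →
    pvSmallestFactorBGo f (N : Int) (i : Int) = (N.minFac : Int) := by
  intro f
  induction f with
  | zero =>
    intro i hk hi hinv
    have hiN : N + 2 ≤ i := by omega
    show (N : Int) = (N.minFac : Int)
    by_cases hp : N.Prime
    · rw [hp.minFac_eq]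
    · exfalso
      have h2m : 2 ≤ N.minFac := (Nat.minFac_prime (by omega)).two_le
      have hle : N.minFac ≤ N := Nat.minFac_le (by omega)
      exact hinv N.minFac h2m (by omega) (Nat.minFac_dvd N)
  | succ f ih =>
    intro i hk hi hinv
    show (if (i : Int) * (i : Int) ≤ (N : Int) then _ else _) = _
    by_cases hguard : (i : Int) * (i : Int) ≤ (N : Int)
    · rw [if_pos hguard]
      have hii : i * i ≤ N := by exact_mod_cast hguard
      have hiN : i ≤ N := le_trans (Nat.le_mul_of_pos_left i (by omega)) hii
      by_cases hdvd : (i : Nat) ∣ N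
      · rw [if_pos (by rw [PySem.Int.mod_eq_zero_iff_dvd]; exact_mod_cast hdvd)]
        have h1 : N.minFac ≤ i := Nat.minFac_le_of_dvd hi hdvd
        have h2' : ¬ N.minFac < i := fun hlt =>
          hinv N.minFac (Nat.minFac_prime (by omega)).two_le hlt (Nat.minFac_dvd N)
        have : i = N.minFac := by omega
        exact_mod_cast congrArg (Nat.cast : Nat → Int) this
      · rw [if_neg (by rw [PySem.Int.mod_eq_zero_iff_dvd]; exact_mod_cast hdvd)]
        have hcast : ((i : Int) + 1) = ((i + 1 : Nat) : Int) := by push_cast; ring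
        rw [hcast]
        refine ih (i + 1) (by omega) (by omega) ?_
        intro j hj1 hj2
        rcases Nat.lt_or_ge j i with h | h
        · exact hinv j hj1 h
        · have : j = i := by omega
          subst this; exact hdvd
    · rw [if_neg hguard]
      by_cases hp : N.Prime
      · rw [hp.minFac_eq]
      · exfalso
        have hsq := Nat.minFac_sq_le_self (by omega) hp
        rw [pow_two] at hsq
        have h2m : 2 ≤ N.minFac := (Nat.minFac_prime (by omega)).two_le
        have hii : ¬ (i * i ≤ N) := fun hc => hguard (by exact_mod_cast hc)
        have hlt : N.minFac < i := by nlinarith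
        exact hinv N.minFac h2m hlt (Nat.minFac_dvd N)

theorem sfB_eq_minFac (N : Nat) (h2 : 2 ≤ N) : pvSmallestFactorB (N : Int) 2 = (N.minFac : Int) := by
  unfold pvSmallestFactorB
  exact sfBGo_inv N h2 ((N : Int) + 2 - 2).toNat 2 (by norm_num) le_rfl (by omega)

-- ---- the strip loop removes exactly the factors p ----
theorem stripGo_spec (p : Nat) (hp : Nat.Prime p) :
    ∀ (f : Nat) (N : Nat), N ≤ f → 1 ≤ N →
    ∃ M : Nat, pvStripBGo f (N : Int) (p : Int) = (M : Int) ∧ 1 ≤ M ∧ M ∣ N ∧ ¬ p ∣ M ∧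
      (∀ r : Nat, Nat.Prime r → r ≠ p → (r ∣ N ↔ r ∣ M)) := by
  intro f
  induction f with
  | zero => intro N hf hN; omega
  | succ f ih =>
    intro N hf hN
    show ∃ M : Nat, (if 1 < (p : Int) ∧ PySem.Int.mod (N : Int) (p : Int) = 0 ∧ (N : Int) ≠ 0
        then pvStripBGo f (PySem.Int.floordiv (N : Int) (p : Int)) (p : Int)
        else (N : Int)) = (M : Int) ∧ _
    by_cases hdvd : p ∣ N
    · rw [if_pos ⟨by exact_mod_cast hp.one_lt,
        by rw [PySem.Int.mod_eq_zero_iff_dvd]; exact_mod_cast hdvd, by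
          simp only [ne_eq, Int.natCast_eq_zero]; omega⟩]
      have hfd : PySem.Int.floordiv (N : Int) (p : Int) = ((N / p : Nat) : Int) := by
        rw [PySem.Int.floordiv_eq_ediv_of_pos (by exact_mod_cast hp.pos)]
        exact_mod_cast (Int.natCast_div N p).symm
      rw [hfd]
      have hlt : N / p < N := Nat.div_lt_self (by omega) hp.one_lt
      have hge : 1 ≤ N / p := (Nat.one_le_div_iff hp.pos).mpr (Nat.le_of_dvd (by omega) hdvd)
      obtain ⟨M, hM1, hM2, hM3, hM4, hM5⟩ := ih (N / p) (by omega) hge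
      refine ⟨M, hM1, hM2, hM3.trans (Nat.div_dvd_of_dvd hdvd), hM4, ?_⟩
      intro r hr hrp
      rw [← hM5 r hr hrp]
      constructor
      · intro hrN
        have hcop : Nat.Coprime r p := (Nat.coprime_primes hr hp).mpr hrp
        have hmul : r ∣ p * (N / p) := by rwa [Nat.mul_div_cancel' hdvd]
        exact Nat.Coprime.dvd_of_dvd_mul_left hcop hmul
      · intro hrq; exact hrq.trans (Nat.div_dvd_of_dvd hdvd)
    · rw [if_neg (by
        rintro ⟨-, hmod, -⟩
        rw [PySem.Int.mod_eq_zero_iff_dvd] at hmod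
        exact hdvd (by exact_mod_cast hmod))]
      exact ⟨N, rfl, hN, dvd_rfl, hdvd, fun r _ _ => Iff.rfl⟩

theorem strip_spec (p : Nat) (hp : Nat.Prime p) :
    ∀ (N : Nat), 1 ≤ N →
    ∃ M : Nat, pvStripB (N : Int) (p : Int) = (M : Int) ∧ 1 ≤ M ∧ M ∣ N ∧ ¬ p ∣ M ∧
      (∀ r : Nat, Nat.Prime r → r ≠ p → (r ∣ N ↔ r ∣ M)) := by
  intro N hN
  unfold pvStripB
  rw [Int.natAbs_natCast]
  exact stripGo_spec p hp N N le_rfl hN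

-- ---- digit sums ----
-- pure digit sum of the decimal digits below five
def pvDsum (N : Nat) : Int :=
  if h : N = 0 then 0 else (if N % 10 < 5 then ((N % 10 : Nat) : Int) else 0) + pvDsum (N / 10)
termination_by N
decreasing_by omega

def pvG (c : Char) : Int := if (c.toNat : Int) - 48 < 5 then (c.toNat : Int) - 48 else 0

theorem pvG_digitChar (d : Nat) (hd : d < 10) :
    pvG (Nat.digitChar d) = if d < 5 then (d : Int) else 0 := by
  interval_cases d <;> decide

theorem filter_map_sum_eq_gsum (l : List Char) :
    (((l.filter (fun c => (c.toNat : Int) - 48 < 5)).map (fun c => (c.toNat : Int) - 48)).sum)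
    = (l.map pvG).sum := by
  induction l with
  | nil => rfl
  | cons c t ih =>
    simp only [List.filter_cons, List.map_cons, List.sum_cons]
    by_cases h : ((c.toNat : Int) - 48 < 5)
    · simp [h, pvG, ih]
    · simp [h, pvG, ih]

theorem pvDsum_pos (N : Nat) (hN : N ≠ 0) :
    pvDsum N = (if N % 10 < 5 then ((N % 10 : Nat) : Int) else 0) + pvDsum (N / 10) := by
  rw [pvDsum, dif_neg hN]

theorem toDigitsCore_gsum (f : Nat) :
    ∀ (N : Nat) (acc : List Char), N < f →
    ((Nat.toDigitsCore 10 f N acc).map pvG).sum = pvDsum N + (acc.map pvG).sum := by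
  induction f with
  | zero => intro N acc h; omega
  | succ f ih =>
    intro N acc h
    rw [Nat.toDigitsCore]
    by_cases h10 : N / 10 = 0
    · rw [if_pos h10]
      simp only [List.map_cons, List.sum_cons]
      rw [pvG_digitChar (N % 10) (Nat.mod_lt _ (by omega))]
      by_cases hN : N = 0
      · subst hN; rw [pvDsum]; simp
      · rw [pvDsum_pos N hN, pvDsum, dif_pos h10]
        omega
    · rw [if_neg h10]
      rw [ih (N / 10) _ (by omega)]
      simp only [List.map_cons, List.sum_cons]
      rw [pvG_digitChar (N % 10) (Nat.mod_lt _ (by omega))]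
      rw [pvDsum_pos N (by omega)]
      ring

theorem digitSumBGo_eq_dsum :
    ∀ (f : Nat) (N : Nat) (s : Int), N ≤ f → pvDigitSumBGo f (N : Int) s = s + pvDsum N := by
  intro f
  induction f with
  | zero =>
    intro N s hf
    have : N = 0 := by omega
    subst this
    show s = s + pvDsum 0
    rw [pvDsum]; simp
  | succ f ih =>
    intro N s hf
    show (if (0 : Int) < (N : Int) then _ else s) = s + pvDsum N
    by_cases hN : N = 0
    · subst hN
      rw [if_neg (by norm_num), pvDsum]; simp
    · rw [if_pos (by exact_mod_cast Nat.pos_of_ne_zero hN)]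
      have hfd : PySem.Int.floordiv (N : Int) 10 = ((N / 10 : Nat) : Int) := by
        rw [PySem.Int.floordiv_eq_ediv_of_pos (by norm_num)]
        exact_mod_cast (Int.natCast_div N 10).symm
      have hmd : PySem.Int.mod (N : Int) 10 = ((N % 10 : Nat) : Int) := by
        rw [PySem.Int.mod_eq_emod_of_pos (by norm_num)]
        exact_mod_cast (Int.natCast_mod N 10).symm
      rw [hfd, hmd, ih (N / 10) _ (by omega)]
      rw [pvDsum_pos N hN]
      by_cases h5 : N % 10 < 5
      · rw [if_pos (by exact_mod_cast h5), if_pos h5]; ring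
      · rw [if_neg (by exact_mod_cast h5), if_neg h5]; ring

theorem digitSumB_eq_dsum (N : Nat) (s : Int) : pvDigitSumB (N : Int) s = s + pvDsum N := by
  unfold pvDigitSumB
  rw [Int.toNat_natCast]
  exact digitSumBGo_eq_dsum N N s le_rfl

theorem digit_sums_eq (N : Nat) :
    (((PySem.Int.toStr (N : Int)).toList.filter
      (fun c => (c.toNat : Int) - 48 < 5)).map (fun c => (c.toNat : Int) - 48)).sum
    = pvDigitSumB (N : Int) 0 := by
  rw [PySem.Int.toList_toStr, filter_map_sum_eq_gsum, digitSumB_eq_dsum]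
  have h1 : PySem.Int.toChars (N : Int) = Nat.toDigits 10 N := by
    simp [PySem.Int.toChars]
  rw [h1]
  have h2 := toDigitsCore_gsum (N + 1) N [] (by omega)
  simp only [List.map_nil, List.sum_nil, add_zero] at h2
  rw [Nat.toDigits, h2]
  ring

-- ---- assembling the two sides ----
-- the main-loop value, for 2 ≤ N, as a function of the stripped cofactor M
theorem loop_value (N M : Nat) (h2 : 2 ≤ N) (hMge : 1 ≤ M) (hMdvd : M ∣ N)
    (hMnp : ¬ N.minFac ∣ M) (hMiff : ∀ r : Nat, Nat.Prime r → r ≠ N.minFac → (r ∣ N ↔ r ∣ M)) :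
    (PySem.List.pyRange 2 (N : Int) 1).foldl (pvLoopA (N : Int) (N.minFac : Int)) (-1)
    = if 1 < M then (N : Int) - (M.minFac : Int) else -1 := by
  have hpp : N.minFac.Prime := Nat.minFac_prime (by omega)
  have hp2 : 2 ≤ N.minFac := hpp.two_le
  have hpN : N.minFac ∣ N := Nat.minFac_dvd N
  by_cases hM1 : 1 < M
  · -- a second prime factor exists: the loop maximum is N - M.minFac
    rw [if_pos hM1]
    set q := M.minFac with hqdef
    have hq : q.Prime := Nat.minFac_prime (by omega)
    have hqM : q ∣ M := Nat.minFac_dvd M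
    have hqN : q ∣ N := hqM.trans hMdvd
    have hqp : q ≠ N.minFac := fun h => hMnp (h ▸ hqM)
    have hple : N.minFac ≤ q := Nat.minFac_le_of_dvd hq.two_le hqN
    have hplt : N.minFac < q := lt_of_le_of_ne hple (Ne.symm hqp)
    have hq3 : 3 ≤ q := by omega
    have hpqN : N.minFac * q ∣ N :=
      Nat.Coprime.mul_dvd_of_dvd_of_dvd ((Nat.coprime_primes hpp hq).mpr (Ne.symm hqp)) hpN hqN
    have hNpq : N.minFac * q ≤ N := Nat.le_of_dvd (by omega) hpqN
    have h2qN : 2 * q ≤ N := le_trans (Nat.mul_le_mul_right q hp2) hNpq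
    have hqltN : q < N := by omega
    -- every prime factor of N other than N.minFac is at least q
    have hbig : ∀ r : Nat, Nat.Prime r → r ∣ N → r ≠ N.minFac → q ≤ r := by
      intro r hr hrN hrp
      exact Nat.minFac_le_of_dvd hr.two_le ((hMiff r hr hrp).mp hrN)
    -- the witness N - q satisfies the loop predicate
    have hwit : Int.gcd (N : Int) ((N - q : Nat) : Int) ≠ 1 ∧
        PySem.Int.mod ((N - q : Nat) : Int) (N.minFac : Int) ≠ 0 := by
      constructor
      · rw [Int.gcd_natCast_natCast]
        intro hg
        have hq1 : q ∣ Nat.gcd N (N - q) := Nat.dvd_gcd hqN (Nat.dvd_sub hqN dvd_rfl)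
        rw [hg] at hq1
        have := Nat.le_of_dvd (by omega) hq1
        omega
      · rw [ne_eq, PySem.Int.mod_eq_zero_iff_dvd, Int.natCast_dvd_natCast]
        intro hpd
        have : N.minFac ∣ q := by
          have := Nat.dvd_sub hpN hpd
          rwa [Nat.sub_sub_self (by omega)] at this
        exact hqp ((Nat.prime_dvd_prime_iff_eq hpp hq).mp this).symm
    -- nothing above N - q satisfies the loop predicate
    have habove : ∀ j : Int, ((N - q : Nat) : Int) < j → j < (N : Int) →
        ¬(Int.gcd (N : Int) j ≠ 1 ∧ PySem.Int.mod j (N.minFac : Int) ≠ 0) := by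
      rintro j hj1 hj2 ⟨hg, hm⟩
      have hj0 : 0 ≤ j := le_trans (by positivity) (le_of_lt hj1)
      obtain ⟨J, rfl⟩ : ∃ J : Nat, j = (J : Int) := ⟨j.toNat, (Int.toNat_of_nonneg hj0).symm⟩
      have hJ1 : N - q < J := by exact_mod_cast hj1
      have hJ2 : J < N := by exact_mod_cast hj2
      rw [Int.gcd_natCast_natCast] at hg
      rw [ne_eq, PySem.Int.mod_eq_zero_iff_dvd, Int.natCast_dvd_natCast] at hm
      set g := Nat.gcd N J with hgdef
      have hgpos : 0 < g := Nat.gcd_pos_of_pos_left J (by omega)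
      set r := g.minFac with hrdef
      have hr : r.Prime := Nat.minFac_prime (by omega)
      have hrg : r ∣ g := Nat.minFac_dvd g
      have hrN : r ∣ N := hrg.trans (Nat.gcd_dvd_left N J)
      have hrJ : r ∣ J := hrg.trans (Nat.gcd_dvd_right N J)
      by_cases hrp : r = N.minFac
      · exact hm (hrp ▸ hrJ)
      · have hqr : q ≤ r := hbig r hr hrN hrp
        have hrsub : r ∣ N - J := Nat.dvd_sub hrN hrJ
        have := Nat.le_of_dvd (by omega) hrsub
        omega
    set res := (PySem.List.pyRange 2 (N : Int) 1).foldl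
      (pvLoopA (N : Int) (N.minFac : Int)) (-1) with hres
    have hge : ((N - q : Nat) : Int) ≤ res :=
      foldl_loopA_ge_mem (N : Int) (N.minFac : Int) (N : Int) ((N - q : Nat) : Int) hwit
        ((N : Int) - 2).toNat 2 (-1) rfl (by omega) (by omega)
    have hcases := foldl_loopA_cases (N : Int) (N.minFac : Int) (N : Int)
      ((N : Int) - 2).toNat 2 (-1) rfl
    rw [← hres] at hcases
    rcases hcases with h | ⟨hP, hr2, hrN⟩
    · exfalso; rw [h] at hge; omega
    · have : ¬ ((N - q : Nat) : Int) < res := fun hlt => habove res hlt hrN hP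
      have hreq : res = ((N - q : Nat) : Int) := by omega
      rw [hreq, Nat.cast_sub (by omega)]
  · -- N is a prime power: no i in range qualifies
    rw [if_neg hM1]
    have hMe : M = 1 := by omega
    subst hMe
    apply foldl_loopA_none
    · rintro j h1 h2 ⟨hg, hm⟩
      obtain ⟨J, rfl⟩ : ∃ J : Nat, j = (J : Int) := ⟨j.toNat, (Int.toNat_of_nonneg (by omega)).symm⟩
      rw [Int.gcd_natCast_natCast] at hg
      rw [ne_eq, PySem.Int.mod_eq_zero_iff_dvd, Int.natCast_dvd_natCast] at hm
      set g := Nat.gcd N J with hgdef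
      have hgpos : 0 < g := Nat.gcd_pos_of_pos_left J (by omega)
      set r := g.minFac with hrdef
      have hr : r.Prime := Nat.minFac_prime (by omega)
      have hrg : r ∣ g := Nat.minFac_dvd g
      have hrN : r ∣ N := hrg.trans (Nat.gcd_dvd_left N J)
      have hrJ : r ∣ J := hrg.trans (Nat.gcd_dvd_right N J)
      by_cases hrp : r = N.minFac
      · exact hm (hrp ▸ hrJ)
      · have : r ∣ 1 := (hMiff r hr hrp).mp hrN
        have := Nat.le_of_dvd one_pos this
        have := hr.two_le
        omega
    · rfl
    · exact le_rfl

theorem main_eq (N : Nat) :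
    product_max_not_coprime_and_sum_digits_less_than_five (N : Int)
    = product_max_not_coprime_and_sum_digits_less_than_five_alt (N : Int) := by
  by_cases h2 : 2 ≤ N
  · have hpp : N.minFac.Prime := Nat.minFac_prime (by omega)
    have hp2 : 2 ≤ N.minFac := hpp.two_le
    obtain ⟨M, hM1, hMge, hMdvd, hMnp, hMiff⟩ := strip_spec N.minFac hpp N (by omega)
    unfold product_max_not_coprime_and_sum_digits_less_than_five
      product_max_not_coprime_and_sum_digits_less_than_five_alt
    simp only [sdA_eq_minFac N h2, sfB_eq_minFac N h2, digit_sums_eq N]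
    have hmeq : (if (1 : Int) < (N.minFac : Int) then pvStripB (N : Int) (N.minFac : Int)
        else (N : Int)) = (M : Int) := by
      rw [if_pos (by exact_mod_cast hpp.one_lt), hM1]
    rw [hmeq, loop_value N M h2 hMge hMdvd hMnp hMiff]
    by_cases hM : 1 < M
    · rw [if_pos hM, if_pos (show (1 : Int) < (M : Int) by exact_mod_cast hM),
        sfB_eq_minFac M hM]
    · rw [if_neg hM, if_neg (show ¬ (1 : Int) < (M : Int) from fun hc => hM (by exact_mod_cast hc))]
  · interval_cases N
    · decide
    · decide

-- ===== VERDICT (by name: the statement is the Claim_ definition above) =====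
theorem product_max_not_coprime_and_sum_digits_less_than_five_spec : Claim_equal_product_max_not_coprime_and_sum_digits_less_than_five := by
  intro n _ hpre
  unfold Spec_product_max_not_coprime_and_sum_digits_less_than_five
  obtain ⟨N, rfl⟩ : ∃ N : Nat, n = (N : Int) :=
    ⟨n.toNat, (Int.toNat_of_nonneg hpre).symm⟩
  exact main_eq N
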